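-- pv_equiv track=rewrite | github.com/Dashinginthe90s/hydrus | hydrus/client/ClientFilesPhysical.py | GetMissingPrefixes
-- ===== SOURCE A (Python) =====
-- import typing
--
-- def GetMissingPrefixes( merge_target: str, prefixes: typing.Collection[ str ], min_prefix_length_allowed = 3, prefixes_are_filtered: bool = False ):
--
--     # given a merge target of 'tf'
--     # do these prefixes, let's say { tf0, tf1, tf2, tf3, tf4, tf5, tf6, tf7, tf8, tf9, tfa, tfb, tfc, tfd, tfe, tff }, add up to 'tf'?
--
--     hex_chars = '0123456789abcdef'
--
--     if prefixes_are_filtered: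
--
--         matching_prefixes = prefixes
--
--     else:
--
--         matching_prefixes = { prefix for prefix in prefixes if prefix.startswith( merge_target ) }
--
--
--     missing_prefixes = []
--
--     for char in hex_chars:
--
--         expected_prefix = merge_target + char
--
--         if expected_prefix in matching_prefixes:
--
--             # we are good
--             pass
--
--         else:
--
--             matching_prefixes_for_this_char = { prefix for prefix in prefixes if prefix.startswith( expected_prefix ) }
--
--             if len( matching_prefixes_for_this_char ) > 0 or len( expected_prefix ) < min_prefix_length_allowed:
--
--                 missing_for_this_char = GetMissingPrefixes( expected_prefix, matching_prefixes_for_this_char, prefixes_are_filtered = True )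
--
--                 missing_prefixes.extend( missing_for_this_char )
--
--             else:
--
--                 missing_prefixes.append( expected_prefix )
--
--
--
--
--     return missing_prefixes
-- ===== SOURCE B (Python) =====
-- def GetMissingPrefixes(merge_target, prefixes, min_prefix_length_allowed=3, prefixes_are_filtered=False):
--     # Iterative DFS over an explicit worklist instead of recursion: one global
--     # membership set built once; coverage tested by scanning the original
--     # prefixes (the result depends only on the set of prefixes, so no
--     # per-level filtered subsets and no use of prefixes_are_filtered).
--     hex_chars = '0123456789abcdef'
--     present = set(prefixes)
--     out = []
--     stack = [(merge_target, min_prefix_length_allowed)]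
--     while stack:
--         t, m = stack.pop()
--         if m is None:
--             out.append(t)
--             continue
--         for c in reversed(hex_chars):
--             e = t + c
--             if e in present:
--                 continue
--             if any(p.startswith(e) for p in prefixes) or len(e) < m:
--                 stack.append((e, 3))
--             else:
--                 stack.append((e, None))
--     return out
-- ===== Notes on version B (the rewrite author's own statement) =====
-- stated objective: alternative
-- what changed: Replaces the recursion that rebuilds a filtered prefix subset at every level by an explicit worklist DFS over (target, min_len) frames that uses one global membership set built once plus a direct scan for coverage, exploiting that the result depends only on the set of prefixes (so prefixes_are_filtered and the per-level subsets disappear).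
import Mathlib
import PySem

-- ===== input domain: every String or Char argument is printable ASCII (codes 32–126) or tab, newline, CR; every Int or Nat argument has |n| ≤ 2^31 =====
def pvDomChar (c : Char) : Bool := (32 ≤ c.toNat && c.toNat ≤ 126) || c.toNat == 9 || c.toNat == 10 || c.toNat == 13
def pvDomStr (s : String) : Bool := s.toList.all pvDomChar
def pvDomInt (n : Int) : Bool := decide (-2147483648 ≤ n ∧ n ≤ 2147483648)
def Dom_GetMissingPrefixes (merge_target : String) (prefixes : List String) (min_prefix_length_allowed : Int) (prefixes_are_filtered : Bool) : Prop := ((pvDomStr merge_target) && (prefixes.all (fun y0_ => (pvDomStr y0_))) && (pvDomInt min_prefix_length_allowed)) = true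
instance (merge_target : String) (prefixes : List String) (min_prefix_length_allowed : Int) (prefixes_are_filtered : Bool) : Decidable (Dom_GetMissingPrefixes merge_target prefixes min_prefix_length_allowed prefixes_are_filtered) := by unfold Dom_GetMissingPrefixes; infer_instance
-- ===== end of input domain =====

-- B replaces A's recursion (which re-filters a prefix subset at every level) by an
-- explicit worklist DFS using one global membership set and a direct coverage scan;
-- same return value (the result depends only on the set of prefixes), no mutation.
-- Both ports carry a fuel argument as a totality guard, set to a bound (proved in the
-- lemmas below) on the recursion depth / number of worklist steps, so it never runs out.

def pvHexChars : List Char := "0123456789abcdef".toList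

-- fuel bounds used by the ports
def pvMaxLen : List String → Nat
  | [] => 0
  | s :: r => max s.toList.length (pvMaxLen r)

def pvMeasure (L : Nat) (t : String) (m : Int) : Nat :=
  max (max L m.toNat) (max 3 t.toList.length) + 1 - t.toList.length

-- ===== PORT A =====
def pvGoA : Nat → String → List String → Int → Bool → List String
  | 0, _, _, _, _ => []
  | fuel+1, merge_target, prefixes, m, prefixes_are_filtered =>
    let matching : PySem.Set String :=
      if prefixes_are_filtered then PySem.Set.ofList prefixes
      else PySem.Set.ofList (prefixes.filter (fun p => PySem.Str.startswith p merge_target))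
    pvHexChars.foldl (fun missing c =>
      let e := merge_target.push c
      if PySem.Set.contains matching e then missing
      else
        let sub : PySem.Set String := PySem.Set.ofList (prefixes.filter (fun p => PySem.Str.startswith p e))
        if PySem.Set.len sub > 0 ∨ PySem.Str.len e < m then
          missing ++ pvGoA fuel e sub 3 true
        else
          missing ++ [e]) []

def GetMissingPrefixes (merge_target : String) (prefixes : List String) (min_prefix_length_allowed : Int) (prefixes_are_filtered : Bool) : List String :=
  pvGoA (pvMeasure (pvMaxLen prefixes) merge_target min_prefix_length_allowed) merge_target prefixes min_prefix_length_allowed prefixes_are_filtered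

-- ===== PORT B =====
inductive PvItem where
  | emit : String → PvItem
  | node : String → Int → PvItem

-- weight of a worklist item / of the whole worklist (the fuel bound of the loop)
def pvWeight (L : Nat) : PvItem → Nat
  | .emit _ => 1
  | .node t m => 18 ^ pvMeasure L t (min m ((t.toList.length : Int) + 2))

def pvStackW (L : Nat) (st : List PvItem) : Nat := (st.map (pvWeight L)).sum

-- the body of Source B's for-loop: what (if anything) gets pushed for child character c
def pvMkItem (prefixes : List String) (present : PySem.Set String) (m : Int) (t : String) (c : Char) : Option PvItem :=
  let e := t.push c
  if PySem.Set.contains present e then none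
  else if prefixes.any (fun p => PySem.Str.startswith p e) ∨ PySem.Str.len e < m then some (.node e 3)
  else some (.emit e)

def pvGoB (prefixes : List String) (present : PySem.Set String) : Nat → List PvItem → List String → List String
  | _, [], out => out
  | 0, _, out => out
  | fuel+1, .emit s :: rest, out => pvGoB prefixes present fuel rest (out ++ [s])
  | fuel+1, .node t m :: rest, out =>
      pvGoB prefixes present fuel
        (pvHexChars.reverse.foldl (fun st c => match pvMkItem prefixes present m t c with | none => st | some it => it :: st) rest)
        out

def GetMissingPrefixes_alt (merge_target : String) (prefixes : List String) (min_prefix_length_allowed : Int) (prefixes_are_filtered : Bool) : List String :=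
  let present := PySem.Set.ofList prefixes
  pvGoB prefixes present (pvStackW (pvMaxLen prefixes) [.node merge_target min_prefix_length_allowed]) [.node merge_target min_prefix_length_allowed] []

-- ===== PRECONDITION & SPEC =====
def Spec_GetMissingPrefixes (merge_target : String) (prefixes : List String) (min_prefix_length_allowed : Int) (prefixes_are_filtered : Bool) (out : List String) : Prop := out = GetMissingPrefixes_alt merge_target prefixes min_prefix_length_allowed prefixes_are_filtered
instance (merge_target : String) (prefixes : List String) (min_prefix_length_allowed : Int) (prefixes_are_filtered : Bool) (out : List String) : Decidable (Spec_GetMissingPrefixes merge_target prefixes min_prefix_length_allowed prefixes_are_filtered out) := by unfold Spec_GetMissingPrefixes; infer_instance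

-- ===== CLAIM (what is proved, stated in full; the proofs are below) =====
def Claim_equal_GetMissingPrefixes : Prop := ∀ (merge_target : String) (prefixes : List String) (min_prefix_length_allowed : Int) (prefixes_are_filtered : Bool), Dom_GetMissingPrefixes merge_target prefixes min_prefix_length_allowed prefixes_are_filtered → Spec_GetMissingPrefixes merge_target prefixes min_prefix_length_allowed prefixes_are_filtered (GetMissingPrefixes merge_target prefixes min_prefix_length_allowed prefixes_are_filtered)

-- ===== LEMMAS AND PROOFS =====

theorem pvMaxLen_mem {s : String} {ps : List String} (h : s ∈ ps) : s.toList.length ≤ pvMaxLen ps := by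
  induction ps with
  | nil => simp at h
  | cons a r ih =>
    rcases List.mem_cons.mp h with h | h
    · subst h; simp [pvMaxLen]
    · exact le_trans (ih h) (by simp [pvMaxLen])

theorem pvMaxLen_subset {xs ys : List String} (h : ∀ s ∈ xs, s ∈ ys) : pvMaxLen xs ≤ pvMaxLen ys := by
  induction xs with
  | nil => simp [pvMaxLen]
  | cons a r ih =>
    simp only [pvMaxLen, max_le_iff]
    exact ⟨pvMaxLen_mem (h a (by simp)), ih (fun s hs => h s (by simp [hs]))⟩

theorem pvMeasure_pos (L : Nat) (t : String) (m : Int) : 1 ≤ pvMeasure L t m := by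
  unfold pvMeasure; omega

theorem pvMeasure_decr {L L' : Nat} {t : String} (c : Char) {m : Int}
    (hL : L' ≤ L)
    (h : t.toList.length + 1 ≤ L' ∨ ((t.toList.length : Int) + 1 < m)) :
    pvMeasure L' (t.push c) 3 < pvMeasure L t m := by
  unfold pvMeasure
  simp only [String.toList_push, List.length_append, List.length_cons, List.length_nil]
  omega

theorem pvLen_of_startswith {p e : String} (h : PySem.Str.startswith p e = true) :
    e.toList.length ≤ p.toList.length := by
  rw [PySem.Str.startswith_eq, PySem.Chars.startswith_iff] at h
  exact h.length_le

-- the fuel bound really shrinks atics recursive call of port A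
theorem pvSub_decr {prefixes : List String} {t : String} (c : Char) {m : Int}
    (h : PySem.Set.len (PySem.Set.ofList (List.filter (fun p => PySem.Str.startswith p (t.push c)) prefixes)) > 0
         ∨ PySem.Str.len (t.push c) < m) :
    pvMeasure (pvMaxLen (PySem.Set.ofList (List.filter (fun p => PySem.Str.startswith p (t.push c)) prefixes))) (t.push c) 3
      < pvMeasure (pvMaxLen prefixes) t m := by
  apply pvMeasure_decr c
  · apply pvMaxLen_subset
    intro s hs
    exact (List.mem_filter.mp ((PySem.Set.mem_ofList _ _).mp hs)).1
  · rcases h with h | h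
    · left
      have hpos : 0 < (PySem.Set.ofList (List.filter (fun p => PySem.Str.startswith p (t.push c)) prefixes)).length := by
        have h' : (0:Int) < ((PySem.Set.ofList (List.filter (fun p => PySem.Str.startswith p (t.push c)) prefixes)).length : Int) := by
          simpa [PySem.Set.len] using h
        exact_mod_cast h'
      obtain ⟨x, hx⟩ := List.exists_mem_of_length_pos hpos
      have hsw := (List.mem_filter.mp ((PySem.Set.mem_ofList _ _).mp hx)).2
      have h1 := pvLen_of_startswith hsw
      have h2 := pvMaxLen_mem hx
      simp only [String.toList_push, List.length_append, List.length_cons, List.length_nil] at h1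
      omega
    · right
      rw [PySem.Str.len_eq] at h
      simp only [String.toList_push, List.length_append, List.length_cons, List.length_nil] at h
      omega

theorem pvSW_push (t : String) (c : Char) : PySem.Str.startswith (t.push c) t = true := by
  rw [PySem.Str.startswith_eq, PySem.Chars.startswith_iff, String.toList_push]
  exact ⟨[c], rfl⟩

theorem pvSW_trans {p e t : String} (h1 : PySem.Str.startswith p e = true)
    (h2 : PySem.Str.startswith e t = true) : PySem.Str.startswith p t = true := by
  rw [PySem.Str.startswith_eq, PySem.Chars.startswith_iff] at *
  exact h2.trans h1

theorem pvMatching_mem {ps : List String} {f : Bool} {t s : String} (hs : PySem.Str.startswith s t = true) :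
    (PySem.Set.contains (if f then PySem.Set.ofList ps else PySem.Set.ofList (ps.filter (fun p => PySem.Str.startswith p t))) s = true) ↔ s ∈ ps := by
  split
  · rw [PySem.Set.contains_iff, PySem.Set.mem_ofList]
  · rw [PySem.Set.contains_iff, PySem.Set.mem_ofList, List.mem_filter]
    exact ⟨fun h => h.1, fun h => ⟨h, hs⟩⟩

theorem pvSubPos {ps : List String} {e : String} :
    PySem.Set.len (PySem.Set.ofList (ps.filter (fun p => PySem.Str.startswith p e))) > 0
      ↔ ∃ p ∈ ps, PySem.Str.startswith p e = true := by
  have hlen : PySem.Set.len (PySem.Set.ofList (ps.filter (fun p => PySem.Str.startswith p e)))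
      = ((PySem.Set.ofList (ps.filter (fun p => PySem.Str.startswith p e))).length : Int) := rfl
  rw [hlen, gt_iff_lt, Int.natCast_pos, List.length_pos_iff]
  constructor
  · intro h
    obtain ⟨x, hx⟩ := List.exists_mem_of_ne_nil _ h
    have hm := List.mem_filter.mp ((PySem.Set.mem_ofList _ _).mp hx)
    exact ⟨x, hm.1, hm.2⟩
  · rintro ⟨p, hp, hq⟩
    exact List.ne_nil_of_mem ((PySem.Set.mem_ofList _ _).mpr (List.mem_filter.mpr ⟨hp, hq⟩))

-- A's result depends on `prefixes` only through membership of extensions of the target, is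
-- independent of `prefixes_are_filtered`, and of the fuel once the fuel is at least the bound
theorem pvCongF : ∀ (fuel1 fuel2 : Nat) (t : String) (ps1 ps2 : List String) (m : Int) (f1 f2 : Bool),
    pvMeasure (pvMaxLen ps1) t m ≤ fuel1 →
    pvMeasure (pvMaxLen ps2) t m ≤ fuel2 →
    (∀ s, PySem.Str.startswith s t = true → (s ∈ ps1 ↔ s ∈ ps2)) →
    pvGoA fuel1 t ps1 m f1 = pvGoA fuel2 t ps2 m f2 := by
  intro fuel1
  induction fuel1 with
  | zero =>
    intro fuel2 t ps1 ps2 m f1 f2 h1 h2 H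
    have := pvMeasure_pos (pvMaxLen ps1) t m
    omega
  | succ n IH =>
    intro fuel2 t ps1 ps2 m f1 f2 h1 h2 H
    have hp2 := pvMeasure_pos (pvMaxLen ps2) t m
    obtain ⟨k, rfl⟩ : ∃ k, fuel2 = k + 1 := ⟨fuel2 - 1, by omega⟩
    simp only [pvGoA]
    apply PySem.List.foldl_congr_mem
    intro acc c _
    have hsw := pvSW_push t c
    have hctn : (PySem.Set.contains (if f1 then PySem.Set.ofList ps1 else PySem.Set.ofList (ps1.filter (fun p => PySem.Str.startswith p t))) (t.push c))
        = (PySem.Set.contains (if f2 then PySem.Set.ofList ps2 else PySem.Set.ofList (ps2.filter (fun p => PySem.Str.startswith p t))) (t.push c)) := by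
      apply Bool.coe_iff_coe.mp
      rw [pvMatching_mem hsw, pvMatching_mem hsw]
      exact H _ hsw
    rw [hctn]
    by_cases hc2 : PySem.Set.contains (if f2 then PySem.Set.ofList ps2 else PySem.Set.ofList (ps2.filter (fun p => PySem.Str.startswith p t))) (t.push c) = true
    · rw [if_pos hc2, if_pos hc2]
    · rw [if_neg hc2, if_neg hc2]
      have hcond : (PySem.Set.len (PySem.Set.ofList (ps1.filter (fun p => PySem.Str.startswith p (t.push c)))) > 0 ∨ PySem.Str.len (t.push c) < m)
          ↔ (PySem.Set.len (PySem.Set.ofList (ps2.filter (fun p => PySem.Str.startswith p (t.push c)))) > 0 ∨ PySem.Str.len (t.push c) < m) := by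
        rw [pvSubPos, pvSubPos]
        constructor <;> rintro (⟨p, hp, hq⟩ | h)
        · exact Or.inl ⟨p, (H p (pvSW_trans hq hsw)).mp hp, hq⟩
        · exact Or.inr h
        · exact Or.inl ⟨p, (H p (pvSW_trans hq hsw)).mpr hp, hq⟩
        · exact Or.inr h
      by_cases h2c : (PySem.Set.len (PySem.Set.ofList (ps2.filter (fun p => PySem.Str.startswith p (t.push c)))) > 0 ∨ PySem.Str.len (t.push c) < m)
      · rw [if_pos (hcond.mpr h2c), if_pos h2c]
        have hrec : pvGoA n (t.push c) (PySem.Set.ofList (ps1.filter (fun p => PySem.Str.startswith p (t.push c)))) 3 true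
            = pvGoA k (t.push c) (PySem.Set.ofList (ps2.filter (fun p => PySem.Str.startswith p (t.push c)))) 3 true := by
          apply IH
          · have := pvSub_decr (prefixes := ps1) (t := t) c (m := m) (hcond.mpr h2c)
            omega
          · have := pvSub_decr (prefixes := ps2) (t := t) c (m := m) h2c
            omega
          · intro s hs
            rw [PySem.Set.mem_ofList, PySem.Set.mem_ofList, List.mem_filter, List.mem_filter]
            constructor
            · rintro ⟨hm1, hq⟩; exact ⟨(H s (pvSW_trans hs hsw)).mp hm1, hq⟩
            · rintro ⟨hm1, hq⟩; exact ⟨(H s (pvSW_trans hs hsw)).mpr hm1, hq⟩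
        rw [hrec]
      · rw [if_neg (fun hh => h2c (hcond.mp hh)), if_neg h2c]

-- pushing the children in reversed hex order = prepending the in-order child items
theorem pvRevFoldl (f : Char → Option PvItem) (cs : List Char) (st : List PvItem) :
    cs.reverse.foldl (fun st c => match f c with | none => st | some it => it :: st) st
      = cs.filterMap f ++ st := by
  induction cs generalizing st with
  | nil => simp
  | cons c cs ih =>
    rw [List.reverse_cons, List.foldl_append, ih]
    cases hfc : f c <;> simp [hfc]

theorem pvWeight_item_le {prefixes : List String} {present : PySem.Set String} {m : Int} {t : String} {it : PvItem}
    (hm : it ∈ List.filterMap (pvMkItem prefixes present m t) pvHexChars) :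
    pvWeight (pvMaxLen prefixes) it ≤ 18 ^ (pvMeasure (pvMaxLen prefixes) t (min m ((t.toList.length : Int) + 2)) - 1) := by
  obtain ⟨c, -, hc⟩ := List.mem_filterMap.mp hm
  simp only [pvMkItem] at hc
  split at hc
  · exact absurd hc (by simp)
  · split at hc
    · rename_i hcond
      cases hc
      have hlt : pvMeasure (pvMaxLen prefixes) (t.push c) 3 < pvMeasure (pvMaxLen prefixes) t (min m ((t.toList.length : Int) + 2)) := by
        apply pvMeasure_decr c le_rfl
        rcases hcond with h | h
        · left
          obtain ⟨p, hp, hsw⟩ := List.any_eq_true.mp h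
          have h1 := pvLen_of_startswith hsw
          have h2 := pvMaxLen_mem hp
          simp only [String.toList_push, List.length_append, List.length_cons, List.length_nil] at h1
          omega
        · right
          rw [PySem.Str.len_eq] at h
          simp only [String.toList_push, List.length_append, List.length_cons, List.length_nil] at h
          rw [lt_min_iff]
          omega
      have hw : pvWeight (pvMaxLen prefixes) (PvItem.node (t.push c) 3)
          = 18 ^ pvMeasure (pvMaxLen prefixes) (t.push c) 3 := by
        have hmin : min (3 : Int) (((t.push c).toList.length : Int) + 2) = 3 := by
          simp only [String.toList_push, List.length_append, List.length_cons, List.length_nil]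
          omega
        simp only [pvWeight]
        rw [hmin]
      rw [hw]
      exact Nat.pow_le_pow_right (by norm_num) (by omega)
    · cases hc
      exact Nat.one_le_pow _ _ (by norm_num)

theorem pvChildren_lt (prefixes : List String) (present : PySem.Set String) (m : Int) (t : String) :
    ((List.filterMap (pvMkItem prefixes present m t) pvHexChars).map (pvWeight (pvMaxLen prefixes))).sum
      < 18 ^ pvMeasure (pvMaxLen prefixes) t (min m ((t.toList.length : Int) + 2)) := by
  set B := 18 ^ (pvMeasure (pvMaxLen prefixes) t (min m ((t.toList.length : Int) + 2)) - 1) with hBdef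
  have hB : ∀ x ∈ (List.filterMap (pvMkItem prefixes present m t) pvHexChars).map (pvWeight (pvMaxLen prefixes)),
      x ≤ B := by
    intro x hx
    obtain ⟨it, hit, rfl⟩ := List.mem_map.mp hx
    exact pvWeight_item_le hit
  have hsum := List.sum_le_card_nsmul _ _ hB
  have hlen : (List.filterMap (pvMkItem prefixes present m t) pvHexChars).length ≤ 16 := by
    have := List.length_filterMap_le (pvMkItem prefixes present m t) pvHexChars
    simpa [pvHexChars] using this
  have hpow : 0 < B := Nat.pow_pos (by norm_num)
  have hmu := pvMeasure_pos (pvMaxLen prefixes) t (min m ((t.toList.length : Int) + 2))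
  have hsplit : 18 ^ pvMeasure (pvMaxLen prefixes) t (min m ((t.toList.length : Int) + 2)) = B * 18 := by
    rw [hBdef, ← Nat.pow_succ]
    congr 1
    omega
  simp only [List.length_map, smul_eq_mul] at hsum
  have h16 : ((List.filterMap (pvMkItem prefixes present m t) pvHexChars).map (pvWeight (pvMaxLen prefixes))).sum ≤ 16 * B :=
    le_trans hsum (Nat.mul_le_mul_right _ hlen)
  rw [hsplit]
  omega

-- the value of a worklist item
def pvEval (prefixes : List String) : PvItem → List String
  | .emit s => [s]
  | .node t m => GetMissingPrefixes t (prefixes.filter (fun p => PySem.Str.startswith p t)) m true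

-- processing one node of B's worklist contributes exactly A's value on that node
theorem pvNodeLoop (prefixes : List String) (t : String) (m : Int) (n : Nat)
    (hn : pvMeasure (pvMaxLen (prefixes.filter (fun p => PySem.Str.startswith p t))) t m ≤ n + 1) :
    ∀ (chars : List Char) (acc : List String),
      chars.foldl (fun missing c =>
        if PySem.Set.contains (PySem.Set.ofList (prefixes.filter (fun p => PySem.Str.startswith p t))) (t.push c) then missing
        else
          if PySem.Set.len (PySem.Set.ofList ((prefixes.filter (fun p => PySem.Str.startswith p t)).filter (fun p => PySem.Str.startswith p (t.push c)))) > 0 ∨ PySem.Str.len (t.push c) < m then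
            missing ++ pvGoA n (t.push c) (PySem.Set.ofList ((prefixes.filter (fun p => PySem.Str.startswith p t)).filter (fun p => PySem.Str.startswith p (t.push c)))) 3 true
          else
            missing ++ [t.push c]) acc
      = acc ++ (chars.filterMap (pvMkItem prefixes (PySem.Set.ofList prefixes) m t)).flatMap (pvEval prefixes) := by
  intro chars
  induction chars with
  | nil => intro acc; simp
  | cons c rest ihc =>
    intro acc
    rw [List.foldl_cons, List.filterMap_cons]
    have hsw := pvSW_push t c
    have hctn : PySem.Set.contains (PySem.Set.ofList (prefixes.filter (fun p => PySem.Str.startswith p t))) (t.push c)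
        = PySem.Set.contains (PySem.Set.ofList prefixes) (t.push c) := by
      apply Bool.coe_iff_coe.mp
      rw [PySem.Set.contains_iff, PySem.Set.contains_iff, PySem.Set.mem_ofList, PySem.Set.mem_ofList, List.mem_filter]
      exact ⟨fun h => h.1, fun h => ⟨h, hsw⟩⟩
    by_cases hin : PySem.Set.contains (PySem.Set.ofList prefixes) (t.push c) = true
    · have hmk : pvMkItem prefixes (PySem.Set.ofList prefixes) m t c = none := by
        simp only [pvMkItem]
        rw [if_pos hin]
      rw [hmk]
      simp only [if_pos (hctn.trans hin)]
      exact ihc acc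
    · have hany : (PySem.Set.len (PySem.Set.ofList ((prefixes.filter (fun p => PySem.Str.startswith p t)).filter (fun p => PySem.Str.startswith p (t.push c)))) > 0)
          ↔ (prefixes.any (fun p => PySem.Str.startswith p (t.push c)) = true) := by
        rw [pvSubPos, List.any_eq_true]
        constructor
        · rintro ⟨p, hp, hq⟩; exact ⟨p, (List.mem_filter.mp hp).1, hq⟩
        · rintro ⟨p, hp, hq⟩; exact ⟨p, List.mem_filter.mpr ⟨hp, pvSW_trans hq hsw⟩, hq⟩
      rw [if_neg (by rw [hctn]; exact hin)]
      by_cases hcond : ((prefixes.any (fun p => PySem.Str.startswith p (t.push c))) = true ∨ PySem.Str.len (t.push c) < m)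
      · have hmk : pvMkItem prefixes (PySem.Set.ofList prefixes) m t c = some (.node (t.push c) 3) := by
          simp only [pvMkItem]
          rw [if_neg hin, if_pos hcond]
        rw [hmk]
        rw [if_pos (by rcases hcond with h | h; exact Or.inl (hany.mpr h); exact Or.inr h)]
        have hrec : pvGoA n (t.push c) (PySem.Set.ofList ((prefixes.filter (fun p => PySem.Str.startswith p t)).filter (fun p => PySem.Str.startswith p (t.push c)))) 3 true
            = pvEval prefixes (.node (t.push c) 3) := by
          show _ = GetMissingPrefixes (t.push c) (prefixes.filter (fun p => PySem.Str.startswith p (t.push c))) 3 true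
          rw [GetMissingPrefixes]
          apply pvCongF
          · have hd : (PySem.Set.len (PySem.Set.ofList ((prefixes.filter (fun p => PySem.Str.startswith p t)).filter (fun p => PySem.Str.startswith p (t.push c)))) > 0 ∨ PySem.Str.len (t.push c) < m) := by
              rcases hcond with h | h
              · exact Or.inl (hany.mpr h)
              · exact Or.inr h
            have := pvSub_decr (prefixes := prefixes.filter (fun p => PySem.Str.startswith p t)) (t := t) c (m := m) hd
            omega
          · exact le_rfl
          · intro s hs
            rw [PySem.Set.mem_ofList, List.mem_filter, List.mem_filter, List.mem_filter]
            constructor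
            · rintro ⟨⟨hm1, _⟩, h3⟩; exact ⟨hm1, h3⟩
            · rintro ⟨hm1, h3⟩; exact ⟨⟨hm1, pvSW_trans h3 hsw⟩, h3⟩
        rw [hrec, ihc]
        simp [List.append_assoc]
      · have hmk : pvMkItem prefixes (PySem.Set.ofList prefixes) m t c = some (.emit (t.push c)) := by
          simp only [pvMkItem]
          rw [if_neg hin, if_neg hcond]
        rw [hmk]
        rw [if_neg (fun hh => hcond (by rcases hh with h | h; exact Or.inl (hany.mp h); exact Or.inr h))]
        rw [ihc]
        simp [pvEval, List.append_assoc]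

theorem pvNode (prefixes : List String) (t : String) (m : Int) :
    (List.filterMap (pvMkItem prefixes (PySem.Set.ofList prefixes) m t) pvHexChars).flatMap (pvEval prefixes)
      = pvEval prefixes (.node t m) := by
  show _ = GetMissingPrefixes t (prefixes.filter (fun p => PySem.Str.startswith p t)) m true
  rw [GetMissingPrefixes]
  have hp := pvMeasure_pos (pvMaxLen (prefixes.filter (fun p => PySem.Str.startswith p t))) t m
  obtain ⟨n, hn⟩ : ∃ n, pvMeasure (pvMaxLen (prefixes.filter (fun p => PySem.Str.startswith p t))) t m = n + 1 :=
    ⟨pvMeasure (pvMaxLen (prefixes.filter (fun p => PySem.Str.startswith p t))) t m - 1, by omega⟩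
  rw [hn]
  simp only [pvGoA, if_true]
  rw [pvNodeLoop prefixes t m n (by omega) pvHexChars []]
  simp

theorem pvGoB_spec : ∀ (fuel : Nat) (prefixes : List String) (stack : List PvItem) (out : List String),
    pvStackW (pvMaxLen prefixes) stack ≤ fuel →
    pvGoB prefixes (PySem.Set.ofList prefixes) fuel stack out = out ++ stack.flatMap (pvEval prefixes) := by
  intro fuel
  induction fuel with
  | zero =>
    intro ps stack out h
    cases stack with
    | nil => simp [pvGoB]
    | cons it rest =>
      exfalso
      have h1 : 1 ≤ pvWeight (pvMaxLen ps) it := by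
        cases it with
        | emit s => simp [pvWeight]
        | node t m => exact Nat.one_le_pow _ _ (by norm_num)
      simp only [pvStackW, List.map_cons, List.sum_cons] at h
      omega
  | succ N IH =>
    intro ps stack out h
    cases stack with
    | nil => simp [pvGoB]
    | cons it rest =>
      cases it with
      | emit s =>
        have hb : pvStackW (pvMaxLen ps) rest ≤ N := by
          simp only [pvStackW, List.map_cons, List.sum_cons, pvWeight] at h ⊢
          omega
        rw [pvGoB, IH ps rest (out ++ [s]) hb]
        simp [pvEval]
      | node t m =>
        have hb : pvStackW (pvMaxLen ps) (List.filterMap (pvMkItem ps (PySem.Set.ofList ps) m t) pvHexChars ++ rest) ≤ N := by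
          have hch := pvChildren_lt ps (PySem.Set.ofList ps) m t
          simp only [pvStackW, List.map_append, List.sum_append, List.map_cons, List.sum_cons, pvWeight] at h ⊢
          omega
        rw [pvGoB, pvRevFoldl, IH ps _ out hb, List.flatMap_append, pvNode]
        simp [List.flatMap_cons]

-- ===== VERDICT (by name: the statement is the Claim_ definition above) =====
theorem GetMissingPrefixes_spec : Claim_equal_GetMissingPrefixes := by
  unfold Claim_equal_GetMissingPrefixes
  intro mt ps m f _
  unfold Spec_GetMissingPrefixes
  show GetMissingPrefixes mt ps m f = GetMissingPrefixes_alt mt ps m f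
  rw [GetMissingPrefixes_alt]
  rw [pvGoB_spec (pvStackW (pvMaxLen ps) [.node mt m]) ps _ [] le_rfl]
  simp only [List.flatMap_cons, List.flatMap_nil, List.append_nil, List.nil_append, pvEval]
  rw [GetMissingPrefixes, GetMissingPrefixes]
  apply pvCongF _ _ _ _ _ _ _ _ le_rfl le_rfl
  intro s hs
  rw [List.mem_filter]
  exact ⟨fun h => ⟨h, hs⟩, fun h => h.1⟩
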